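-- pv_equiv track=rewrite | github.com/nxveen19/RideSafe | inference/evaluation/challan_rate_calc.py | validate_lp
-- ===== SOURCE A (Python) =====
-- def validate_lp(gt_lp):
--     state_codes = ['AP', 'AR', 'AS', 'BR', 'CG', 'GA', 'GJ', 'HR', 'HP', 'JK', 'JH', 'KA', 'KL', 'MP', 'MH', 'MN', 'ML', 'MZ', 'NL', 'PB', 'RJ', 'SK', 'TN', 'TS', 'TR', 'UP', 'UK', 'WB', 'AN', 'CH', 'DD', 'DL', 'LD', 'PY']
--     gt = False
--     gt_lp = gt_lp.upper()
--     gt_lp = ''.join(e for e in gt_lp if e.isalnum())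
--     if gt_lp == None or len(gt_lp) <= 8 :
--         return False
--
--
--     for state in state_codes:
--         if state in gt_lp:
--             gt = True
--     if gt:
--         return True
--     else:
--         return False
--
--     return False
-- ===== SOURCE B (Python) =====
-- # first-letter -> allowed second letters of the 34 state codes
-- _NEXT = {'A': 'PRSN', 'B': 'R', 'C': 'GH', 'D': 'DL', 'G': 'AJ', 'H': 'RP',
--          'J': 'KH', 'K': 'AL', 'L': 'D', 'M': 'PHNLZ', 'N': 'L', 'P': 'BY',
--          'R': 'J', 'S': 'K', 'T': 'NSR', 'U': 'PK', 'W': 'B'}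
--
--
-- def validate_lp(gt_lp):
--     s = ''.join(c for c in gt_lp.upper() if c.isalnum())
--     if len(s) <= 8:
--         return False
--     prev = s[0]
--     for c in s[1:]:
--         if c in _NEXT.get(prev, ''):
--             return True
--         prev = c
--     return False
-- ===== Notes on version B (the rewrite author's own statement) =====
-- stated objective: alternative
-- what changed: Instead of testing each of 34 state codes as a substring of the plate and keeping a flag to the end, B walks the normalized plate once with a previous-character accumulator and an early return, checking each adjacent pair against a first-letter-to-second-letters dict.
import Mathlib
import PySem

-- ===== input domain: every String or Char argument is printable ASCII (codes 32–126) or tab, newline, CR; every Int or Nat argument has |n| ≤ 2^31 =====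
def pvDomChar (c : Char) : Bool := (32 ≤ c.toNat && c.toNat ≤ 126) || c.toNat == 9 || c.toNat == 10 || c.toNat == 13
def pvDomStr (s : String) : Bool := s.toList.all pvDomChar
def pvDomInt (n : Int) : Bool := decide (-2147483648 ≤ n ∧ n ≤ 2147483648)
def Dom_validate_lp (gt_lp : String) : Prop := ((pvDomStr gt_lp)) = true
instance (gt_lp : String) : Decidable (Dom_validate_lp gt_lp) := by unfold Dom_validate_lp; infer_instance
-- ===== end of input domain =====

-- B replaces A's scan over all 34 state codes (one substring search per code, a flag kept to the
-- end) by one left-to-right walk over the normalized plate with a previous-character accumulator,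
-- an early return, and a dict mapping a code's first letter to its possible second letters.

-- ===== PORT A =====
-- the 34 two-letter state codes, as lists of characters
def pvStateCodes : List (List Char) :=
  [['A','P'], ['A','R'], ['A','S'], ['B','R'], ['C','G'], ['G','A'], ['G','J'], ['H','R'],
   ['H','P'], ['J','K'], ['J','H'], ['K','A'], ['K','L'], ['M','P'], ['M','H'], ['M','N'],
   ['M','L'], ['M','Z'], ['N','L'], ['P','B'], ['R','J'], ['S','K'], ['T','N'], ['T','S'],
   ['T','R'], ['U','P'], ['U','K'], ['W','B'], ['A','N'], ['C','H'], ['D','D'], ['D','L'],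
   ['L','D'], ['P','Y']]

def validate_lp (gt_lp : String) : Bool :=
  -- gt = False; gt_lp = gt_lp.upper(); gt_lp = ''.join(e for e in gt_lp if e.isalnum())
  let gt : Bool := false
  let s : List Char := (PySem.Chars.upper gt_lp.toList).filter PySem.Chars.isalnum
  -- 'gt_lp == None' is always False here (gt_lp is a str), so the guard is len(gt_lp) <= 8
  if (s.length : Int) ≤ 8 then false
  else
    -- for state in state_codes: if state in gt_lp: gt = True
    let gt := pvStateCodes.foldl (fun g st => if PySem.Chars.isIn st s then true else g) gt
    if gt then true else false

-- ===== PORT B =====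
-- _NEXT: first letter of a code ↦ its possible second letters ('PRSN' as a list of chars)
def pvNext : PySem.Dict Char (List Char) :=
  PySem.Dict.mk [('A', ['P','R','S','N']), ('B', ['R']), ('C', ['G','H']), ('D', ['D','L']),
    ('G', ['A','J']), ('H', ['R','P']), ('J', ['K','H']), ('K', ['A','L']), ('L', ['D']),
    ('M', ['P','H','N','L','Z']), ('N', ['L']), ('P', ['B','Y']), ('R', ['J']), ('S', ['K']),
    ('T', ['N','S','R']), ('U', ['P','K']), ('W', ['B'])]

-- the for-loop with its early return: prev is the accumulator; 'c in _NEXT.get(prev, "")' is a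
-- length-1 substring test, i.e. exactly element membership of the character c
def pvScan : Char → List Char → Bool
  | _, [] => false
  | prev, c :: rest =>
      if (PySem.Dict.getD pvNext prev []).contains c then true else pvScan c rest

def validate_lp_alt (gt_lp : String) : Bool :=
  -- s = ''.join(c for c in gt_lp.upper() if c.isalnum())
  let s : List Char := (PySem.Chars.upper gt_lp.toList).filter PySem.Chars.isalnum
  if (s.length : Int) ≤ 8 then false
  else
    -- prev = s[0]; for c in s[1:]: …   (s is nonempty here since len(s) > 8)
    match s with
    | [] => false
    | h :: t => pvScan h t

-- ===== PRECONDITION & SPEC =====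
def Spec_validate_lp (gt_lp : String) (out : Bool) : Prop := out = validate_lp_alt gt_lp
instance (gt_lp : String) (out : Bool) : Decidable (Spec_validate_lp gt_lp out) := by unfold Spec_validate_lp; infer_instance

-- ===== CLAIM (what is proved, stated in full; the proofs are below) =====
def Claim_equal_validate_lp : Prop := ∀ (gt_lp : String), Dom_validate_lp gt_lp → Spec_validate_lp gt_lp (validate_lp gt_lp)

-- ===== LEMMAS AND PROOFS =====

-- a length-2 list is an infix of cs iff it is an adjacent pair of cs
lemma infix_pair (x y : Char) : ∀ (cs : List Char),
    ([x, y] <:+: cs) ↔ (x, y) ∈ cs.zip cs.tail := by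
  intro cs
  induction cs with
  | nil => simp
  | cons a t ih =>
    rw [List.infix_cons_iff, ih]
    cases t with
    | nil => simp
    | cons b t' =>
      constructor
      · rintro (⟨r, hr⟩ | hmem)
        · simp only [List.cons_append, List.nil_append] at hr
          injection hr with h1 hr; injection hr with h2 _
          subst h1; subst h2; simp
        · simp only [List.zip, List.tail] at hmem ⊢
          exact List.mem_cons_of_mem _ hmem
      · intro hmem
        rcases List.mem_cons.mp hmem with h | h
        · left
          obtain ⟨rfl, rfl⟩ : a = x ∧ b = y := by
            simpa using congrArg (fun p => (p.1, p.2)) h.symm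
          exact ⟨t', by simp⟩
        · right; exact h

-- A's flag-setting fold is an 'any'
lemma foldl_flag (p : List Char → Bool) : ∀ (l : List (List Char)) (b : Bool),
    l.foldl (fun g st => if p st then true else g) b = (b || l.any p) := by
  intro l
  induction l with
  | nil => simp
  | cons st t ih =>
    intro b
    simp only [List.foldl_cons, List.any_cons, ih]
    by_cases h : p st = true <;> simp [h]

-- every state code's second letter is stored in the dict under its first letter
set_option maxRecDepth 4096 in
lemma code_table' : ∀ st ∈ pvStateCodes,
    ((PySem.Dict.getD pvNext (st.getD 0 'A') []).contains (st.getD 1 'A')) = true := by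
  intro st hst
  fin_cases hst <;> decide

-- B's dict lookup tests exactly membership of the pair among the codes
set_option maxRecDepth 4096 in
lemma mem_next (x y : Char) :
    ((PySem.Dict.getD pvNext x []).contains y = true) ↔ [x, y] ∈ pvStateCodes := by
  constructor
  · intro h
    rw [PySem.Dict.getD_eq_get?_getD] at h
    cases hg : pvNext.get? x with
    | none => rw [hg] at h; simp at h
    | some L =>
      rw [hg] at h
      have hy : y ∈ L := by simpa using h
      have hmem : (x, L) ∈ pvNext.items :=
        (PySem.Dict.get?_eq_some_iff_mem_items pvNext x L (by decide)).mp hg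
      fin_cases hmem <;> fin_cases hy <;> decide
  · intro h
    exact code_table' [x, y] h

-- every state code has exactly two letters
lemma code_shape (st : List Char) (h : st ∈ pvStateCodes) : ∃ x y, st = [x, y] := by
  have h2 : st.length = 2 := (by decide : ∀ s ∈ pvStateCodes, s.length = 2) st h
  rcases st with _ | ⟨x, _ | ⟨y, _ | _⟩⟩
  · simp at h2
  · simp at h2
  · exact ⟨x, y, rfl⟩
  · simp at h2

-- B's walk finds exactly the adjacent pairs that are codes
lemma scan_iff : ∀ (cs : List Char) (prev : Char),
    pvScan prev cs = true ↔ ∃ p ∈ (prev :: cs).zip cs, [p.1, p.2] ∈ pvStateCodes := by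
  intro cs
  induction cs with
  | nil => simp [pvScan]
  | cons c rest ih =>
    intro prev
    simp only [pvScan]
    by_cases h : (PySem.Dict.getD pvNext prev []).contains c = true
    · rw [if_pos h]
      exact iff_of_true rfl ⟨(prev, c), by simp, (mem_next prev c).mp h⟩
    · rw [if_neg h, ih c]
      constructor
      · rintro ⟨p, hp, hc⟩; exact ⟨p, List.mem_cons_of_mem _ hp, hc⟩
      · rintro ⟨p, hp, hc⟩
        rcases List.mem_cons.mp hp with rfl | hp'
        · exact absurd ((mem_next prev c).mpr hc) h
        · exact ⟨p, hp', hc⟩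

-- A's scan over the codes agrees with B's walk over the plate
lemma any_eq_scan (a : Char) (t : List Char) :
    pvStateCodes.any (fun st => PySem.Chars.isIn st (a :: t)) = pvScan a t := by
  rw [Bool.eq_iff_iff]
  simp only [List.any_eq_true, PySem.Chars.isIn_iff_infix]
  rw [scan_iff]
  constructor
  · rintro ⟨st, hst, hinf⟩
    obtain ⟨x, y, rfl⟩ := code_shape st hst
    exact ⟨(x, y), by simpa using (infix_pair x y (a :: t)).mp hinf, hst⟩
  · rintro ⟨⟨x, y⟩, hmem, hcode⟩
    exact ⟨[x, y], hcode, (infix_pair x y (a :: t)).mpr (by simpa using hmem)⟩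

-- ===== VERDICT (by name: the statement is the Claim_ definition above) =====
theorem validate_lp_spec : Claim_equal_validate_lp := by
  intro gt_lp _
  simp only [Spec_validate_lp, validate_lp, validate_lp_alt]
  cases hq : (PySem.Chars.upper gt_lp.toList).filter PySem.Chars.isalnum with
  | nil => simp
  | cons a t =>
    by_cases h : (((a :: t).length : Nat) : Int) ≤ 8
    · rw [if_pos h, if_pos h]
    · rw [if_neg h, if_neg h, foldl_flag, Bool.false_or, any_eq_scan]
      cases hpv : pvScan a t <;> simp [hpv]
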